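-- pv_equiv track=rewrite | github.com/masijiaqiu/AI-projects | q-learning-robot/my_assign3QL.py | buildTransitionDiag
-- ===== SOURCE A (Python) =====
-- def buildTransitionDiag(states):
-- 	tDiag = {}
-- 	for s1 in states:
-- 		tDiag[s1] = []
-- 		for s2 in states:
-- 			difference = [i for i in range(len(s1)) if s1[i] != s2[i]]
-- 			if len(difference) == 1:
-- 				tDiag[s1].append(s2)
-- 			else:
-- 				continue
-- 	# tDiag['UUFF'] = []
-- 	return tDiag
-- ===== SOURCE B (Python) =====
-- def buildTransitionDiag(states):
--     L = len(states[0]) if states else 0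
--     # bucket (i, s with position i deleted) -> indices of states matching that wildcard pattern
--     buckets = {}
--     for idx, s in enumerate(states):
--         for i in range(L):
--             buckets.setdefault((i, s[:i] + s[i + 1:]), []).append(idx)
--     tDiag = {}
--     for s1 in states:
--         if s1 in tDiag:
--             continue
--         cand = []
--         for i in range(L):
--             for idx in buckets.get((i, s1[:i] + s1[i + 1:]), []):
--                 if states[idx][i] != s1[i]:
--                     cand.append(idx)
--         cand.sort()
--         tDiag[s1] = [states[idx] for idx in cand]
--     return tDiag
-- ===== Notes on version B (the rewrite author's own statement) =====
-- stated objective: faster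
-- what changed: Replaces A's all-pairs O(n^2*L) Hamming comparison by a wildcard-bucket index (dict keyed by (position, string with that position deleted) built in one pass); each state's neighbors are collected from L bucket lookups and sorted back into original-index order.
import Mathlib
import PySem

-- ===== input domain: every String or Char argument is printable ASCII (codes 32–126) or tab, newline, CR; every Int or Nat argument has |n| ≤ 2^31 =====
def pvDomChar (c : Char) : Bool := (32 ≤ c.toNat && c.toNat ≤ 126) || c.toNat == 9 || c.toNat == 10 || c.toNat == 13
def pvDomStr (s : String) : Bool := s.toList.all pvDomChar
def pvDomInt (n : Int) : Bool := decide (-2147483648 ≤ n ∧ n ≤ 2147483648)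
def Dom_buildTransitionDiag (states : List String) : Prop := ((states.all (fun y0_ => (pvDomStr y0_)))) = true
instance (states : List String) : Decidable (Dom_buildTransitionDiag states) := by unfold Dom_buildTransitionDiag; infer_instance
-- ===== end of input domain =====

-- B replaces A's quadratic all-pairs Hamming scan by wildcard-pattern buckets (one deleted
-- position per key): neighbors are collected from the buckets and sorted by original index.

-- ===== PORT A =====
def buildTransitionDiag (states : List String) : List (String × List String) :=
  (states.foldl
    (fun tDiag s1 =>
      states.foldl
        (fun tDiag s2 =>
          let difference :=
            (PySem.List.pyRange 0 (PySem.Str.len s1) 1).filter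
              (fun i => PySem.Str.pyGet? s1 i != PySem.Str.pyGet? s2 i)
          if difference.length == 1 then
            tDiag.modify s1 [] (fun l => l ++ [s2])
          else tDiag)
        (tDiag.insert s1 []))
    PySem.Dict.empty).items

-- ===== PORT B =====
-- s[:i] + s[i+1:]
def pvDelAt (s : String) (i : Int) : String :=
  PySem.Str.slice s none (some i) ++ PySem.Str.slice s (some (i + 1)) none

def buildTransitionDiag_alt (states : List String) : List (String × List String) :=
  let L : Int := match states with | [] => 0 | s :: _ => PySem.Str.len s
  let buckets : PySem.Dict (Int × String) (List Int) :=
    (PySem.List.enumerate states).foldl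
      (fun b p =>
        (PySem.List.pyRange 0 L 1).foldl
          (fun b i => b.modify (i, pvDelAt p.2 i) [] (fun l => l ++ [p.1])) b)
      PySem.Dict.empty
  (states.foldl
    (fun tDiag s1 =>
      if tDiag.contains s1 then tDiag
      else
        let cand :=
          (PySem.List.pyRange 0 L 1).foldl
            (fun cand i =>
              cand ++ (buckets.getD (i, pvDelAt s1 i) []).filter
                (fun idx =>
                  PySem.Str.pyGet? (PySem.List.pyGetD states idx "") i != PySem.Str.pyGet? s1 i))
            []
        let cand := PySem.List.sorted cand (fun x => x)
        tDiag.insert s1 (cand.map (fun idx => PySem.List.pyGetD states idx "")))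
    PySem.Dict.empty).items

-- ===== PRECONDITION & SPEC =====
-- Pre_ excludes lists whose strings do not all have the same length: on those A raises
-- IndexError (s2[i] with i beyond the end of a shorter s2).
def Pre_buildTransitionDiag (states : List String) : Prop :=
  ∀ s ∈ states, ∀ t ∈ states, PySem.Str.len s = PySem.Str.len t
instance (states : List String) : Decidable (Pre_buildTransitionDiag states) := by
  unfold Pre_buildTransitionDiag; infer_instance
def pvWitness_buildTransitionDiag : List String := ["ab", "bb", "aa"]

def Spec_buildTransitionDiag (states : List String) (out : List (String × List String)) : Prop :=
  out = buildTransitionDiag_alt states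
instance (states : List String) (out : List (String × List String)) :
    Decidable (Spec_buildTransitionDiag states out) := by unfold Spec_buildTransitionDiag; infer_instance

-- ===== CLAIM (what is proved, stated in full; the proofs are below) =====
def Claim_equal_buildTransitionDiag : Prop :=
  ∀ (states : List String), Dom_buildTransitionDiag states → Pre_buildTransitionDiag states →
    Spec_buildTransitionDiag states (buildTransitionDiag states)

-- ===== LEMMAS AND PROOFS =====

-- A's inner condition (exactly one mismatching position) and its mismatch-position list.
def pvD (s1 s2 : String) : List Int :=
  (PySem.List.pyRange 0 (PySem.Str.len s1) 1).filter
    (fun i => PySem.Str.pyGet? s1 i != PySem.Str.pyGet? s2 i)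

def hamB (s1 s2 : String) : Bool := (pvD s1 s2).length == 1

-- "s2 differs from s1 exactly at position i" as B's bucket machinery tests it.
def pvDB (s1 : String) (i : Int) (u : String) : Bool :=
  (pvDelAt u i == pvDelAt s1 i) && (PySem.Str.pyGet? u i != PySem.Str.pyGet? s1 i)

-- B's bucket dictionary and candidate list, restated for the proofs.
def pvBuckets (states : List String) (L : Int) : PySem.Dict (Int × String) (List Int) :=
  (PySem.List.enumerate states).foldl
    (fun b p =>
      (PySem.List.pyRange 0 L 1).foldl
        (fun b i => b.modify (i, pvDelAt p.2 i) [] (fun l => l ++ [p.1])) b)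
    PySem.Dict.empty

def pvCand (states : List String) (L : Int) (s1 : String) : List Int :=
  (PySem.List.pyRange 0 L 1).foldl
    (fun cand i =>
      cand ++ ((pvBuckets states L).getD (i, pvDelAt s1 i) []).filter
        (fun idx =>
          PySem.Str.pyGet? (PySem.List.pyGetD states idx "") i != PySem.Str.pyGet? s1 i))
    []

def pvPairs (states : List String) (L : Int) : List ((Int × String) × Int) :=
  (PySem.List.enumerate states).flatMap
    (fun p => (PySem.List.pyRange 0 L 1).map (fun i => ((i, pvDelAt p.2 i), p.1)))

-- ----- generic dict lemmas -----

theorem pvModifyInsert {κ ν : Type} [BEq κ] [LawfulBEq κ] (d : PySem.Dict κ ν) (k : κ)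
    (v d0 : ν) (F : ν → ν) : (d.insert k v).modify k d0 F = d.insert k (F v) := by
  show (d.insert k v).insert k (F ((d.insert k v).getD k d0)) = d.insert k (F v)
  rw [PySem.Dict.getD_insert_self, PySem.Dict.insert_insert_self]

theorem pvInsertSelf {κ ν : Type} [BEq κ] [LawfulBEq κ] (d : PySem.Dict κ ν) (k : κ) (v : ν)
    (hnd : d.keys.Nodup) (h : d.get? k = some v) : d.insert k v = d := by
  apply PySem.Dict.ext
  rw [PySem.Dict.items_insert]
  have hc : d.contains k = true := by rw [PySem.Dict.contains_eq_isSome_get?, h]; rfl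
  rw [if_pos hc]
  have hfix : ∀ p ∈ d.items, (if (p.1 == k) = true then (k, v) else p) = p := by
    intro p hp
    by_cases hk : (p.1 == k) = true
    · have hpk : p.1 = k := by simpa using hk
      have hg : d.get? p.1 = some p.2 := PySem.Dict.get?_of_mem_items d (by simpa using hp) hnd
      rw [hpk, h] at hg
      have hv : v = p.2 := by injection hg
      simp [hk, hv]
      rw [← hpk]
    · simp [hk]
  calc List.map (fun p => if (p.1 == k) = true then (k, v) else p) d.items
      = List.map id d.items := List.map_congr_left hfix
    _ = d.items := List.map_id d.items

theorem pvInnerA (l : List String) (p : String → Bool) (d : PySem.Dict String (List String))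
    (k : String) (v : List String) :
    l.foldl (fun d s2 => if p s2 then d.modify k [] (fun a => a ++ [s2]) else d) (d.insert k v)
      = d.insert k (v ++ l.filter p) := by
  induction l generalizing v with
  | nil => simp
  | cons a t ih =>
    simp only [List.foldl_cons, List.filter_cons]
    by_cases h : p a
    · rw [if_pos h, pvModifyInsert, ih, if_pos h]
      simp
    · rw [if_neg h, ih, if_neg h]

theorem pvFoldlSkip {F : String → List String} (l : List String)
    (d : PySem.Dict String (List String)) (hnd : d.keys.Nodup)
    (hval : ∀ k v, d.get? k = some v → v = F k) :
    l.foldl (fun d s => if d.contains s then d else d.insert s (F s)) d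
      = l.foldl (fun d s => d.insert s (F s)) d := by
  induction l generalizing d with
  | nil => rfl
  | cons a t ih =>
    simp only [List.foldl_cons]
    by_cases h : d.contains a = true
    · obtain ⟨v, hv⟩ : ∃ v, d.get? a = some v := by
        rw [PySem.Dict.contains_eq_isSome_get?] at h
        exact Option.isSome_iff_exists.mp h
      have hFa : d.insert a (F a) = d := by
        rw [← hval a v hv] at *
        exact pvInsertSelf d a v hnd hv
      rw [if_pos h, hFa]
      exact ih d hnd hval
    · rw [if_neg h]
      refine ih (d.insert a (F a)) (PySem.Dict.nodup_keys_insert d a (F a) hnd) ?_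
      intro k v hk
      rw [PySem.Dict.get?_insert] at hk
      split at hk
      · next heq => subst heq; exact (Option.some.injEq _ _ ▸ hk).symm ▸ rfl
      · exact hval k v hk

-- ----- A characterization -----

theorem pvA_eq (states : List String) :
    buildTransitionDiag states
      = (states.foldl (fun d s1 => d.insert s1 (states.filter (fun s2 => hamB s1 s2)))
          PySem.Dict.empty).items := by
  unfold buildTransitionDiag
  congr 1
  apply PySem.List.foldl_congr_mem
  intro acc s1 _
  have h := pvInnerA states (fun s2 => hamB s1 s2) acc s1 []
  rw [List.nil_append] at h
  exact h

-- ----- B-side: bucket contents -----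

theorem pvBuckets_eq (states : List String) (L : Int) :
    pvBuckets states L
      = (pvPairs states L).foldl
          (fun d q => d.modify q.1 [] (fun l => l ++ [q.2])) PySem.Dict.empty := by
  unfold pvBuckets pvPairs
  rw [List.foldl_flatMap]
  simp only [List.foldl_map]

theorem pvBucket_getD (states : List String) (L : Int) (key : Int × String) :
    (pvBuckets states L).getD key []
      = ((pvPairs states L).filter (fun q => q.1 == key)).map (fun q => q.2) := by
  rw [pvBuckets_eq, PySem.Dict.getD_foldl_modify_append]
  simp [PySem.Dict.getD_empty]

-- ----- string-position lemmas -----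

theorem pvDelAt_toList (s : String) (i : Int) (h0 : 0 ≤ i) :
    (pvDelAt s i).toList = s.toList.take i.toNat ++ s.toList.drop (i.toNat + 1) := by
  unfold pvDelAt
  rw [String.toList_append, PySem.Str.toList_slice, PySem.Str.toList_slice]
  show PySem.List.slice s.toList none (some i) ++ PySem.List.slice s.toList (some (i+1)) none = _
  rw [PySem.List.slice_to s.toList h0, PySem.List.slice_from s.toList (by omega)]
  congr 1
  congr 1
  omega

theorem pvStrGet (s : String) (i : Int) (h0 : 0 ≤ i) :
    PySem.Str.pyGet? s i = s.toList[i.toNat]? := by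
  rw [PySem.Str.pyGet?_eq]
  show PySem.List.pyGet? s.toList i = _
  rw [show i = ((i.toNat : Nat) : Int) by omega, PySem.List.pyGet?_natCast]
  congr 1

theorem pvDelAt_eq_iff (u v : String) (Ln : Nat) (hu : u.toList.length = Ln)
    (hv : v.toList.length = Ln) (i : Int) (h0 : 0 ≤ i) (hi : i.toNat < Ln) :
    pvDelAt u i = pvDelAt v i
      ↔ ∀ j : Nat, j < Ln → j ≠ i.toNat → u.toList[j]? = v.toList[j]? := by
  rw [← String.toList_inj, pvDelAt_toList u i h0, pvDelAt_toList v i h0]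
  set a := i.toNat with ha
  constructor
  · intro h j hj hne
    have hlen : (u.toList.take a).length = (v.toList.take a).length := by
      simp [hu, hv]
    obtain ⟨h1, h2⟩ := List.append_inj h hlen
    rcases Nat.lt_or_ge j a with hja | hja
    · have := congrArg (fun l => l[j]?) h1
      simpa [List.getElem?_take, hja] using this
    · have hj2 : a + 1 ≤ j := by omega
      have := congrArg (fun l => l[j - (a+1)]?) h2
      simp only [List.getElem?_drop] at this
      rwa [Nat.add_sub_cancel' hj2] at this
  · intro h
    congr 1
    · apply List.ext_getElem?
      intro j
      rcases Nat.lt_or_ge j a with hja | hja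
      · rw [List.getElem?_take, List.getElem?_take, if_pos hja, if_pos hja]
        exact h j (by omega) (by omega)
      · rw [List.getElem?_take, List.getElem?_take, if_neg (by omega), if_neg (by omega)]
    · apply List.ext_getElem?
      intro j
      rw [List.getElem?_drop, List.getElem?_drop]
      rcases Nat.lt_or_ge (a + 1 + j) Ln with hb | hb
      · exact h _ hb (by omega)
      · rw [List.getElem?_eq_none (by omega), List.getElem?_eq_none (by omega)]

theorem pvD_singleton_iff (s1 s2 : String) (Ln : Nat) (hs1 : s1.toList.length = Ln) (i : Int) :
    pvD s1 s2 = [i]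
      ↔ (0 ≤ i ∧ i < (Ln : Int)
          ∧ (PySem.Str.pyGet? s1 i != PySem.Str.pyGet? s2 i) = true
          ∧ ∀ j : Int, 0 ≤ j → j < (Ln : Int) → j ≠ i →
              ¬ ((PySem.Str.pyGet? s1 j != PySem.Str.pyGet? s2 j) = true)) := by
  have hlen : PySem.Str.len s1 = (Ln : Int) := by rw [PySem.Str.len_eq, hs1]
  unfold pvD
  rw [hlen]
  constructor
  · intro h
    have hi : i ∈ List.filter (fun i => PySem.Str.pyGet? s1 i != PySem.Str.pyGet? s2 i)
        (PySem.List.pyRange 0 (Ln : Int) 1) := by rw [h]; exact List.mem_cons_self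
    rw [List.mem_filter, PySem.List.mem_pyRange_one] at hi
    refine ⟨hi.1.1, hi.1.2, hi.2, ?_⟩
    intro j h0 hj hne hpb
    have hjm : j ∈ List.filter (fun i => PySem.Str.pyGet? s1 i != PySem.Str.pyGet? s2 i)
        (PySem.List.pyRange 0 (Ln : Int) 1) := by
      rw [List.mem_filter, PySem.List.mem_pyRange_one]
      exact ⟨⟨h0, hj⟩, hpb⟩
    rw [h, List.mem_singleton] at hjm
    exact hne hjm
  · rintro ⟨h0, hi, hpb, hall⟩
    have hc : List.filter (fun j => PySem.Str.pyGet? s1 j != PySem.Str.pyGet? s2 j)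
          (PySem.List.pyRange 0 (Ln : Int) 1)
        = List.filter (fun j => j == i) (PySem.List.pyRange 0 (Ln : Int) 1) := by
      apply List.filter_congr
      intro j hj
      rw [PySem.List.mem_pyRange_one] at hj
      by_cases hji : j = i
      · subst hji
        rw [beq_self_eq_true]
        exact hpb
      · rw [show (j == i) = false from beq_eq_false_iff_ne.mpr hji]
        exact Bool.eq_false_iff.mpr (fun hb => hall j hj.1 hj.2 hji hb)
    rw [hc, List.filter_beq]
    have hcount : List.count i (PySem.List.pyRange 0 (Ln : Int) 1) = 1 := by
      refine List.count_eq_one_of_mem (PySem.List.nodup_pyRange_one 0 (Ln : Int)) ?_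
      rw [PySem.List.mem_pyRange_one]; exact ⟨h0, hi⟩
    rw [hcount, List.replicate_one]

theorem pvKey (s1 s2 : String) (Ln : Nat) (h1 : s1.toList.length = Ln)
    (h2 : s2.toList.length = Ln) (i : Int) (h0 : 0 ≤ i) (hi : i < (Ln : Int)) :
    pvDB s1 i s2 = true ↔ pvD s1 s2 = [i] := by
  unfold pvDB
  rw [pvD_singleton_iff s1 s2 Ln h1 i, Bool.and_eq_true, beq_iff_eq,
    pvDelAt_eq_iff s2 s1 Ln h2 h1 i h0 (by omega)]
  rw [bne_iff_ne, bne_iff_ne, pvStrGet s1 i h0, pvStrGet s2 i h0]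
  constructor
  · rintro ⟨hdel, hne⟩
    refine ⟨h0, hi, fun h => hne h.symm, ?_⟩
    intro j hj0 hjL hne' hb
    rw [bne_iff_ne, pvStrGet s1 j hj0, pvStrGet s2 j hj0] at hb
    exact hb (hdel j.toNat (by omega) (by omega)).symm
  · rintro ⟨-, -, hpb, hall⟩
    refine ⟨?_, fun h => hpb h.symm⟩
    intro j hjL hja
    by_contra hne
    refine hall (j : Int) (by omega) (by omega) (by omega) ?_
    rw [bne_iff_ne, pvStrGet s1 _ (by omega), pvStrGet s2 _ (by omega), Int.toNat_natCast]
    exact fun h => hne h.symm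

theorem pvHam_iff (s1 s2 : String) : hamB s1 s2 = true ↔ ∃ i, pvD s1 s2 = [i] := by
  unfold hamB
  rw [beq_iff_eq]
  exact List.length_eq_one_iff

-- ----- B-side: the candidate list -----

theorem pvFlatMapIf {α β : Type} (l : List α) (q : α → Bool) (f : α → β) :
    l.flatMap (fun x => if q x then [f x] else []) = (l.filter q).map f := by
  induction l with
  | nil => rfl
  | cons a t ih =>
    rw [List.flatMap_cons, List.filter_cons, ih]
    by_cases h : q a
    · rw [if_pos h, if_pos h, List.map_cons]; rfl
    · rw [if_neg h, if_neg h, List.nil_append]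

theorem pvFilterRangeBeq (L i : Int) (c : Int → Bool)
    (hci : ∀ j, 0 ≤ j → j < L → j ≠ i → c j = false) (h0 : 0 ≤ i) (hi : i < L) :
    (PySem.List.pyRange 0 L 1).filter c = if c i then [i] else [] := by
  by_cases h : c i = true
  · rw [if_pos h]
    have hc : (PySem.List.pyRange 0 L 1).filter c
        = (PySem.List.pyRange 0 L 1).filter (fun j => j == i) := by
      apply List.filter_congr
      intro j hj
      rw [PySem.List.mem_pyRange_one] at hj
      by_cases hji : j = i
      · subst hji; rw [beq_self_eq_true, h]
      · rw [show (j == i) = false from beq_eq_false_iff_ne.mpr hji]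
        exact hci j hj.1 hj.2 hji
    rw [hc, List.filter_beq,
      List.count_eq_one_of_mem (PySem.List.nodup_pyRange_one 0 L)
        (PySem.List.mem_pyRange_one.mpr ⟨h0, hi⟩), List.replicate_one]
  · rw [if_neg h, List.filter_eq_nil_iff.mpr]
    intro j hj
    rw [PySem.List.mem_pyRange_one] at hj
    by_cases hji : j = i
    · subst hji; exact Bool.eq_false_iff.mp (Bool.not_eq_true _ ▸ (by simpa using h))
    · exact Bool.eq_false_iff.mp (hci j hj.1 hj.2 hji)

theorem pvCi (states : List String) (s1 : String) (L i : Int) (h0 : 0 ≤ i) (hi : i < L) :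
    ((pvBuckets states L).getD (i, pvDelAt s1 i) []).filter
        (fun idx => PySem.Str.pyGet? (PySem.List.pyGetD states idx "") i != PySem.Str.pyGet? s1 i)
      = ((PySem.List.enumerate states).filter (fun p => pvDB s1 i p.2)).map (fun p => p.1) := by
  rw [pvBucket_getD, List.filter_map, List.filter_filter]
  unfold pvPairs
  rw [List.filter_flatMap, List.map_flatMap]
  have hstep : ∀ p ∈ PySem.List.enumerate states,
      List.map (fun q => q.2)
        (List.filter
          (fun q => ((fun idx => PySem.Str.pyGet? (PySem.List.pyGetD states idx "") i
              != PySem.Str.pyGet? s1 i) ∘ (fun q => q.2)) q && (q.1 == (i, pvDelAt s1 i)))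
          ((PySem.List.pyRange 0 L 1).map (fun j => ((j, pvDelAt p.2 j), p.1))))
      = (fun p => if pvDB s1 i p.2 then [p.1] else []) p := by
    intro p hp
    rw [List.filter_map, pvFilterRangeBeq L i _ ?_ h0 hi]
    · have hc : (((fun idx => PySem.Str.pyGet? (PySem.List.pyGetD states idx "") i
            != PySem.Str.pyGet? s1 i) ∘ (fun q : (Int × String) × Int => q.2))
            (((i, pvDelAt p.2 i), p.1)) && ((((i, pvDelAt p.2 i), p.1)).1 == (i, pvDelAt s1 i)))
          = pvDB s1 i p.2 := by
        obtain ⟨k, hk, rfl⟩ := (PySem.List.mem_enumerate_iff states 0 p).mp hp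
        simp only [Function.comp, pvDB]
        rw [show PySem.List.pyGetD states ((0 : Int) + (k : Int)) "" = states[k] by
          rw [show ((0 : Int) + (k : Int)) = ((k : Nat) : Int) by omega,
            PySem.List.pyGetD_natCast, List.getD_eq_getElem states "" hk]]
        show (_ && ((i == i) && _)) = _
        rw [beq_self_eq_true, Bool.true_and, Bool.and_comm]
      simp only [Function.comp_apply] at hc ⊢
      simp only [hc]
      by_cases hdb : pvDB s1 i p.2 = true
      · rw [if_pos hdb, if_pos hdb]
        simp
      · rw [if_neg hdb, if_neg hdb]
        simp
    · intro j hj0 hjL hji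
      show (_ && ((j, pvDelAt p.2 j), p.1).1 == (i, pvDelAt s1 i)) = false
      show (_ && ((j == i) && _)) = false
      rw [beq_eq_false_iff_ne.mpr hji]
      simp
  rw [List.flatMap_congr hstep, pvFlatMapIf]

theorem pvCand_eq (states : List String) (s1 : String) (L : Int) :
    pvCand states L s1
      = (PySem.List.pyRange 0 L 1).flatMap
          (fun i => ((PySem.List.enumerate states).filter (fun p => pvDB s1 i p.2)).map
            (fun p => p.1)) := by
  unfold pvCand
  rw [PySem.List.foldl_append_eq_flatMap, List.nil_append]
  apply List.flatMap_congr
  intro i hi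
  rw [PySem.List.mem_pyRange_one] at hi
  exact pvCi states s1 L i hi.1 hi.2

theorem pvCand_sorted (states : List String) (s1 : String) (Ln : Nat)
    (hall : ∀ s ∈ states, s.toList.length = Ln) (hs1 : s1.toList.length = Ln) :
    (PySem.List.sorted (pvCand states (Ln : Int) s1) (fun x => x)).map
        (fun idx => PySem.List.pyGetD states idx "")
      = states.filter (fun s2 => hamB s1 s2) := by
  have hE : ∀ p ∈ PySem.List.enumerate states,
      ∃ (k : Nat) (h : k < states.length), p = ((k : Int), states[k]) := by
    intro p hp
    obtain ⟨k, hk, hpk⟩ := (PySem.List.mem_enumerate_iff states 0 p).mp hp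
    exact ⟨k, hk, by simpa using hpk⟩
  have hfst : (PySem.List.enumerate states).map (fun p => p.1)
      = PySem.List.pyRange 0 (states.length : Int) 1 := by
    have := PySem.List.map_fst_enumerate states 0
    simpa using this
  have hndfst : ((PySem.List.enumerate states).map (fun p => p.1)).Nodup := by
    rw [hfst]; exact PySem.List.nodup_pyRange_one 0 (states.length : Int)
  set T := (((PySem.List.enumerate states).filter (fun p => hamB s1 p.2)).map (fun p => p.1))
    with hT
  have hndT : T.Nodup :=
    ((List.filter_sublist).map (fun p : Int × String => p.1)).nodup hndfst
  have hpairT : T.Pairwise (fun a b => a < b) := by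
    rw [hT]
    exact List.pairwise_map.mpr
      ((PySem.List.pairwise_lt_enumerate states 0).filter _)
  have hlenmem : ∀ p ∈ PySem.List.enumerate states, p.2.toList.length = Ln := by
    intro p hp
    obtain ⟨k, hk, rfl⟩ := hE p hp
    exact hall _ (List.getElem_mem hk)
  rw [pvCand_eq]
  set C := (PySem.List.pyRange 0 (Ln : Int) 1).flatMap
      (fun i => ((PySem.List.enumerate states).filter (fun p => pvDB s1 i p.2)).map
        (fun p => p.1)) with hC
  have hndC : C.Nodup := by
    rw [hC]
    apply List.nodup_flatMap.mpr
    constructor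
    · intro i _
      exact ((List.filter_sublist).map (fun p : Int × String => p.1)).nodup hndfst
    · apply (PySem.List.pairwise_lt_pyRange_one 0 (Ln : Int)).imp_of_mem
      intro i j hi hj hij
      rw [PySem.List.mem_pyRange_one] at hi hj
      intro x hxi hxj
      rw [List.mem_map] at hxi hxj
      obtain ⟨p, hp, hpx⟩ := hxi
      obtain ⟨q, hq, hqx⟩ := hxj
      rw [List.mem_filter] at hp hq
      obtain ⟨kp, hkp, rfl⟩ := hE p hp.1
      obtain ⟨kq, hkq, rfl⟩ := hE q hq.1
      have hkpq : kp = kq := by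
        simp at hpx hqx
        omega
      subst hkpq
      have h1 := (pvKey s1 _ Ln hs1 (hlenmem _ hp.1) i hi.1 hi.2).mp hp.2
      have h2 := (pvKey s1 _ Ln hs1 (hlenmem _ hq.1) j hj.1 hj.2).mp hq.2
      rw [h1] at h2
      injection h2 with h2
      omega
  have hmem : ∀ x, x ∈ T ↔ x ∈ C := by
    intro x
    rw [hT, hC]
    constructor
    · intro hx
      rw [List.mem_map] at hx
      obtain ⟨p, hp, hpx⟩ := hx
      rw [List.mem_filter] at hp
      obtain ⟨i, hDi⟩ := (pvHam_iff s1 p.2).mp hp.2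
      obtain ⟨hi0, hiL, -, -⟩ := (pvD_singleton_iff s1 p.2 Ln hs1 i).mp hDi
      rw [List.mem_flatMap]
      refine ⟨i, PySem.List.mem_pyRange_one.mpr ⟨hi0, hiL⟩, ?_⟩
      rw [List.mem_map]
      refine ⟨p, List.mem_filter.mpr ⟨hp.1, ?_⟩, hpx⟩
      exact (pvKey s1 p.2 Ln hs1 (hlenmem p hp.1) i hi0 hiL).mpr hDi
    · intro hx
      rw [List.mem_flatMap] at hx
      obtain ⟨i, hi, hxm⟩ := hx
      rw [PySem.List.mem_pyRange_one] at hi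
      rw [List.mem_map] at hxm
      obtain ⟨p, hp, hpx⟩ := hxm
      rw [List.mem_filter] at hp
      have hDi := (pvKey s1 p.2 Ln hs1 (hlenmem p hp.1) i hi.1 hi.2).mp hp.2
      rw [List.mem_map]
      exact ⟨p, List.mem_filter.mpr ⟨hp.1, (pvHam_iff s1 p.2).mpr ⟨i, hDi⟩⟩, hpx⟩
  have hperm : T.Perm C := (List.perm_ext_iff_of_nodup hndT hndC).mpr hmem
  rw [PySem.List.sorted_eq_of_perm_of_pairwise_lt C T (fun x => x) hperm hpairT]
  rw [hT, List.map_map]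
  rw [List.map_congr_left
    (f := (fun idx => PySem.List.pyGetD states idx "") ∘ (fun p : Int × String => p.1))
    (g := fun p : Int × String => p.2) ?_]
  · rw [show (fun p : Int × String => hamB s1 p.2)
        = ((fun s2 => hamB s1 s2) ∘ (fun p : Int × String => p.2)) from rfl,
      ← List.filter_map, PySem.List.map_snd_enumerate]
  · intro p hp
    rw [List.mem_filter] at hp
    obtain ⟨k, hk, rfl⟩ := hE p hp.1
    simp only [Function.comp_apply]
    rw [PySem.List.pyGetD_natCast, List.getD_eq_getElem states "" hk]

-- ----- B characterization and the verdict -----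

theorem pvB_eq (s0 : String) (rest : List String) (Ln : Nat)
    (hall : ∀ s ∈ s0 :: rest, s.toList.length = Ln)
    (hLs : PySem.Str.len s0 = (Ln : Int)) :
    buildTransitionDiag_alt (s0 :: rest)
      = ((s0 :: rest).foldl
          (fun d s1 => if d.contains s1 then d
            else d.insert s1 ((s0 :: rest).filter (fun s2 => hamB s1 s2)))
          PySem.Dict.empty).items := by
  unfold buildTransitionDiag_alt
  simp only [hLs]
  congr 1
  apply PySem.List.foldl_congr_mem
  intro acc s1 hs1
  by_cases h : acc.contains s1 = true
  · rw [if_pos h, if_pos h]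
  · rw [if_neg h, if_neg h]
    congr 1
    exact pvCand_sorted (s0 :: rest) s1 Ln hall (hall s1 hs1)

-- ===== VERDICT (by name: the statement is the Claim_ definition above) =====
theorem buildTransitionDiag_spec : Claim_equal_buildTransitionDiag := by
  intro states _ hPre
  unfold Spec_buildTransitionDiag
  rw [pvA_eq]
  cases states with
  | nil => rfl
  | cons s rest =>
    have hall : ∀ t ∈ s :: rest, t.toList.length = s.toList.length := by
      intro t ht
      have h := hPre t ht s List.mem_cons_self
      rw [PySem.Str.len_eq, PySem.Str.len_eq] at h
      exact_mod_cast h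
    rw [pvB_eq s rest s.toList.length hall (by rw [PySem.Str.len_eq])]
    rw [pvFoldlSkip (s :: rest) PySem.Dict.empty PySem.Dict.nodup_keys_empty
      (by intro k v h; rw [PySem.Dict.get?_empty] at h; cases h)]
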